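-- pv_equiv track=rewrite | github.com/proudhAteR/Schedule_Maker | Infrastructure/Services/Spacy.py | __sanitize_tokens
-- ===== SOURCE A (Python) =====
-- def __sanitize_tokens(raw_tokens: dict) -> dict:
--     merged = {
--         "location": [],
--         "time": [],
--         "extra": [],
--     }
--
--     for key, value in raw_tokens.items():
--         if isinstance(value, str):
--             value = [value]
--
--         base_key = key.split("_")[0]
--         if base_key in merged:
--             merged[base_key].extend(value)
--
--     result = {}
--     for key, items in merged.items():
--         unique_items = list(
--             dict.fromkeys(items)
--         )  # preserve order, remove duplicates
--
--         if unique_items: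
--             result[key] = max(unique_items, key=len)
--
--     return result
-- ===== SOURCE B (Python) =====
-- def __sanitize_tokens(raw_tokens: dict) -> dict:
--     # Single pass: keep only the longest-so-far item per category (strictly
--     # longer replaces, so ties keep the first occurrence, as max(..., key=len)
--     # over the first-occurrence-deduped list does).
--     best = {"location": None, "time": None, "extra": None}
--
--     for key, value in raw_tokens.items():
--         if isinstance(value, str):
--             value = [value]
--
--         base_key = key.split("_")[0]
--         if base_key in best:
--             for item in value:
--                 cur = best[base_key]
--                 if cur is None or len(item) > len(cur):
--                     best[base_key] = item
--
--     return {key: item for key, item in best.items() if item is not None}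
-- ===== Notes on version B (the rewrite author's own statement) =====
-- stated objective: alternative
-- what changed: Replaces A's two-phase build-merged-lists then dedupe-and-max(key=len) reduction by a single pass that keeps, per category, only the longest-so-far item (strict improvement only, so ties keep the first occurrence), with no merged lists and no dedup step.
import Mathlib
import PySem

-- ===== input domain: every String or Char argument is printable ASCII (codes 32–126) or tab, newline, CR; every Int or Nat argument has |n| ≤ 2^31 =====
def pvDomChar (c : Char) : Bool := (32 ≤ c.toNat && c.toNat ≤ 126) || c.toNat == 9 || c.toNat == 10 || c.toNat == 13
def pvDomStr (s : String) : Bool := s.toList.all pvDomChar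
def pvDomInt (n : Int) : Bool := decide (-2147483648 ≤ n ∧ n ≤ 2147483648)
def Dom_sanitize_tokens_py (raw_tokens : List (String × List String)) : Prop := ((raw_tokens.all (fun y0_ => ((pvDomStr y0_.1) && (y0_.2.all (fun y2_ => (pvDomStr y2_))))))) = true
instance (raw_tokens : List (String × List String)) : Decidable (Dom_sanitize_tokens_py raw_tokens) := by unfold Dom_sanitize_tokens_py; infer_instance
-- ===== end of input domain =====

-- B replaces A's build-merged-lists + ordered-dedupe + max(key=len) reduction by a single pass
-- that keeps only the longest-so-far item per category (objective: alternative decomposition).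

-- ===== PORT A =====
-- key.split("_")[0]: the separator "_" is non-empty, so split? is `some` and the
-- resulting list is never empty — the [0] access is total (headD's defaults are dead).
def pvBaseKey (k : String) : String := ((PySem.Str.split? k "_").getD []).headD ""

-- the body of A's first loop (the `isinstance(value, str)` branch is a no-op on the
-- typed domain dict[str, list[str]], where value is always a list)
def pvMergeStep (m : PySem.Dict String (List String)) (kv : String × List String) :
    PySem.Dict String (List String) :=
  let base_key := pvBaseKey kv.1
  if m.contains base_key then m.modify base_key [] (fun l => l ++ kv.2) else m

-- the body of A's second loop; dict.fromkeys-dedup is PySem.List.dedup, max(_, key=len)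
-- is PySem.List.max? (guarded by nonemptiness, so getD's default is dead)
def pvReduceStep (r : PySem.Dict String String) (p : String × List String) :
    PySem.Dict String String :=
  let unique_items := PySem.List.dedup p.2
  if !unique_items.isEmpty then
    r.insert p.1 ((PySem.List.max? unique_items PySem.Str.len).getD "")
  else r

def sanitize_tokens_py (raw_tokens : List (String × List String)) : List (String × String) :=
  let merged : PySem.Dict String (List String) :=
    ((PySem.Dict.empty.insert "location" []).insert "time" []).insert "extra" []
  let merged := raw_tokens.foldl pvMergeStep merged
  (merged.items.foldl pvReduceStep PySem.Dict.empty).items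

-- ===== PORT B =====
-- the body of B's loop: for each item of the category, replace the stored
-- best when the item is strictly longer (None = nothing stored yet)
def pvBestStep (b : PySem.Dict String (Option String)) (kv : String × List String) :
    PySem.Dict String (Option String) :=
  let base_key := pvBaseKey kv.1
  if b.contains base_key then
    kv.2.foldl (fun b item =>
      match b.getD base_key none with
      | none => b.insert base_key (some item)
      | some cur =>
          if PySem.Str.len item > PySem.Str.len cur then b.insert base_key (some item) else b) b
  else b

def sanitize_tokens_py_alt (raw_tokens : List (String × List String)) : List (String × String) :=
  let best : PySem.Dict String (Option String) :=
    ((PySem.Dict.empty.insert "location" none).insert "time" none).insert "extra" none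
  let best := raw_tokens.foldl pvBestStep best
  (best.items.foldl (fun r p =>
      match p.2 with
      | some item => r.insert p.1 item
      | none => r) PySem.Dict.empty).items

-- ===== PRECONDITION & SPEC =====
def Spec_sanitize_tokens_py (raw_tokens : List (String × List String)) (out : List (String × String)) : Prop := out = sanitize_tokens_py_alt raw_tokens
instance (raw_tokens : List (String × List String)) (out : List (String × String)) : Decidable (Spec_sanitize_tokens_py raw_tokens out) := by unfold Spec_sanitize_tokens_py; infer_instance

-- ===== CLAIM (what is proved, stated in full; the proofs are below) =====
def Claim_equal_sanitize_tokens_py : Prop := ∀ (raw_tokens : List (String × List String)), Dom_sanitize_tokens_py raw_tokens → Spec_sanitize_tokens_py raw_tokens (sanitize_tokens_py raw_tokens)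

-- ===== LEMMAS AND PROOFS =====

-- the literal 3-entry dict shapes both loop states keep throughout
def pvMD (la lt le : List String) : PySem.Dict String (List String) :=
  ⟨[("location", la), ("time", lt), ("extra", le)]⟩

def pvBD (oa ob oc : Option String) : PySem.Dict String (Option String) :=
  ⟨[("location", oa), ("time", ob), ("extra", oc)]⟩

-- B's per-item update, as a function of the stored option alone
def pvStepOpt (acc : Option String) (x : String) : Option String :=
  match acc with
  | none => some x
  | some c => if PySem.Str.len x > PySem.Str.len c then some x else some c

-- B's running best over a list IS Python's max(key=len) (first maximal element):
-- the two fold steps agree pointwise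
theorem pv_bo_def (l : List String) :
    PySem.List.max? l PySem.Str.len = l.foldl pvStepOpt none := by
  unfold PySem.List.max?
  apply PySem.List.foldl_congr_mem
  intro acc x _
  cases acc <;> rfl

theorem pv_max?_snoc (l : List String) (x : String) :
    PySem.List.max? (l ++ [x]) PySem.Str.len =
      (match PySem.List.max? l PySem.Str.len with
       | none => some x
       | some c => if PySem.Str.len c < PySem.Str.len x then some x else some c) := by
  simp [PySem.List.max?, List.foldl_append]
  rcases h : List.foldl _ (none : Option String) l with _ | c <;> rfl

theorem pv_bo_mem {x : String} {l : List String} (hx : x ∈ l) :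
    ∃ c, PySem.List.max? l PySem.Str.len = some c ∧ PySem.Str.len x ≤ PySem.Str.len c := by
  rcases h : PySem.List.max? l PySem.Str.len with _ | c
  · rw [PySem.List.max?_eq_none_iff] at h
    subst h; cases hx
  · exact ⟨c, rfl, PySem.List.max?_isMax h x hx⟩

-- deduping (first occurrences kept) does not change the first longest element
theorem pv_bo_dedup (l : List String) :
    PySem.List.max? (PySem.List.dedup l) PySem.Str.len = PySem.List.max? l PySem.Str.len := by
  induction l using List.reverseRecOn with
  | nil => rfl
  | append_singleton l x ih =>
      by_cases hx : x ∈ l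
      · have h1 : PySem.List.dedup (l ++ [x]) = PySem.List.dedup l := by
          simp only [PySem.List.dedup_eq_ofList, PySem.Set.ofList_append_singleton]
          exact PySem.Set.add_of_mem (by rw [PySem.Set.mem_ofList]; exact hx)
        rw [h1, ih, pv_max?_snoc]
        rcases pv_bo_mem hx with ⟨c, hc, hle⟩
        rw [hc]
        show some c = if PySem.Str.len c < PySem.Str.len x then some x else some c
        rw [if_neg (not_lt.mpr hle)]
      · have h1 : PySem.List.dedup (l ++ [x]) = PySem.List.dedup l ++ [x] := by
          simp only [PySem.List.dedup_eq_ofList, PySem.Set.ofList_append_singleton]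
          exact PySem.Set.add_of_not_mem (by rw [PySem.Set.mem_ofList]; exact hx)
        rw [h1, pv_max?_snoc, pv_max?_snoc, ih]

theorem pv_dedup_eq_nil_iff (l : List String) : PySem.List.dedup l = [] ↔ l = [] := by
  constructor
  · intro h
    rw [List.eq_nil_iff_forall_not_mem]
    intro x hx
    have hmem : x ∈ PySem.List.dedup l := (PySem.List.mem_dedup l x).mpr hx
    rw [h] at hmem
    simp at hmem
  · intro h; subst h; rfl

-- computing one A-step / one B-step on the literal 3-entry states
theorem pv_contains_MD (la lt le : List String) (k : String) :
    (pvMD la lt le).contains k = (k == "location" || k == "time" || k == "extra") := by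
  simp only [pvMD, PySem.Dict.contains, List.any_cons, List.any_nil]
  cases h1 : (k == "location") <;> cases h2 : (k == "time") <;> cases h3 : (k == "extra") <;>
    simp_all [BEq.comm]

theorem pv_contains_BD (oa ob oc : Option String) (k : String) :
    (pvBD oa ob oc).contains k = (k == "location" || k == "time" || k == "extra") := by
  simp only [pvBD, PySem.Dict.contains, List.any_cons, List.any_nil]
  cases h1 : (k == "location") <;> cases h2 : (k == "time") <;> cases h3 : (k == "extra") <;>
    simp_all [BEq.comm]

theorem pv_merge_loc (la lt le v : List String) :
    (pvMD la lt le).modify "location" [] (fun l => l ++ v) = pvMD (la ++ v) lt le := by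
  simp [pvMD, PySem.Dict.modify, PySem.Dict.insert, PySem.Dict.contains, PySem.Dict.getD,
    PySem.Dict.get?]
theorem pv_merge_time (la lt le v : List String) :
    (pvMD la lt le).modify "time" [] (fun l => l ++ v) = pvMD la (lt ++ v) le := by
  simp [pvMD, PySem.Dict.modify, PySem.Dict.insert, PySem.Dict.contains, PySem.Dict.getD,
    PySem.Dict.get?]
theorem pv_merge_extra (la lt le v : List String) :
    (pvMD la lt le).modify "extra" [] (fun l => l ++ v) = pvMD la lt (le ++ v) := by
  simp [pvMD, PySem.Dict.modify, PySem.Dict.insert, PySem.Dict.contains, PySem.Dict.getD,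
    PySem.Dict.get?]

theorem pv_inner_step (oa ob oc : Option String) (x base : String)
    (hb : base = "location" ∨ base = "time" ∨ base = "extra") :
    (match (pvBD oa ob oc).getD base none with
     | none => (pvBD oa ob oc).insert base (some x)
     | some cur =>
         if PySem.Str.len x > PySem.Str.len cur then (pvBD oa ob oc).insert base (some x)
         else (pvBD oa ob oc)) =
    (match base with
     | "location" => pvBD (pvStepOpt oa x) ob oc
     | "time" => pvBD oa (pvStepOpt ob x) oc
     | _ => pvBD oa ob (pvStepOpt oc x)) := by
  rcases hb with hb | hb | hb <;> subst hb <;>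
    first
    | (cases oa <;>
        simp [pvBD, pvStepOpt, PySem.Dict.getD, PySem.Dict.get?, PySem.Dict.insert,
          PySem.Dict.contains] <;> split_ifs <;> rfl)
    | (cases ob <;>
        simp [pvBD, pvStepOpt, PySem.Dict.getD, PySem.Dict.get?, PySem.Dict.insert,
          PySem.Dict.contains] <;> split_ifs <;> rfl)
    | (cases oc <;>
        simp [pvBD, pvStepOpt, PySem.Dict.getD, PySem.Dict.get?, PySem.Dict.insert,
          PySem.Dict.contains] <;> split_ifs <;> rfl)

theorem pv_inner_loc (v : List String) : ∀ oa ob oc,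
    (v.foldl (fun b item =>
      match b.getD "location" none with
      | none => b.insert "location" (some item)
      | some cur =>
          if PySem.Str.len item > PySem.Str.len cur then b.insert "location" (some item) else b)
      (pvBD oa ob oc)) = pvBD (v.foldl pvStepOpt oa) ob oc := by
  induction v with
  | nil => intro oa ob oc; rfl
  | cons x t ih =>
      intro oa ob oc
      simp only [List.foldl]
      rw [pv_inner_step oa ob oc x "location" (Or.inl rfl)]
      exact ih _ _ _

theorem pv_inner_time (v : List String) : ∀ oa ob oc,
    (v.foldl (fun b item =>
      match b.getD "time" none with
      | none => b.insert "time" (some item)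
      | some cur =>
          if PySem.Str.len item > PySem.Str.len cur then b.insert "time" (some item) else b)
      (pvBD oa ob oc)) = pvBD oa (v.foldl pvStepOpt ob) oc := by
  induction v with
  | nil => intro oa ob oc; rfl
  | cons x t ih =>
      intro oa ob oc
      simp only [List.foldl]
      rw [pv_inner_step oa ob oc x "time" (Or.inr (Or.inl rfl))]
      exact ih _ _ _

theorem pv_inner_extra (v : List String) : ∀ oa ob oc,
    (v.foldl (fun b item =>
      match b.getD "extra" none with
      | none => b.insert "extra" (some item)
      | some cur =>
          if PySem.Str.len item > PySem.Str.len cur then b.insert "extra" (some item) else b)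
      (pvBD oa ob oc)) = pvBD oa ob (v.foldl pvStepOpt oc) := by
  induction v with
  | nil => intro oa ob oc; rfl
  | cons x t ih =>
      intro oa ob oc
      simp only [List.foldl]
      rw [pv_inner_step oa ob oc x "extra" (Or.inr (Or.inr rfl))]
      exact ih _ _ _

-- running best over the concatenation = continue the fold
theorem pv_bo_append (l v : List String) :
    PySem.List.max? (l ++ v) PySem.Str.len =
      v.foldl pvStepOpt (PySem.List.max? l PySem.Str.len) := by
  rw [pv_bo_def, pv_bo_def, List.foldl_append]

-- the two loops, run from related 3-entry states, stay related
theorem pv_loop (ts : List (String × List String)) : ∀ la lt le,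
    ∃ la' lt' le',
      ts.foldl pvMergeStep (pvMD la lt le) = pvMD la' lt' le' ∧
      ts.foldl pvBestStep
          (pvBD (PySem.List.max? la PySem.Str.len) (PySem.List.max? lt PySem.Str.len)
            (PySem.List.max? le PySem.Str.len)) =
        pvBD (PySem.List.max? la' PySem.Str.len) (PySem.List.max? lt' PySem.Str.len)
          (PySem.List.max? le' PySem.Str.len) := by
  induction ts with
  | nil => intro la lt le; exact ⟨la, lt, le, rfl, rfl⟩
  | cons kv ts ih =>
      intro la lt le
      by_cases h1 : pvBaseKey kv.1 = "location"
      · have hA : pvMergeStep (pvMD la lt le) kv = pvMD (la ++ kv.2) lt le := by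
          simp [pvMergeStep, h1, pv_contains_MD, pv_merge_loc]
        have hB : pvBestStep (pvBD (PySem.List.max? la PySem.Str.len)
            (PySem.List.max? lt PySem.Str.len) (PySem.List.max? le PySem.Str.len)) kv =
            pvBD (PySem.List.max? (la ++ kv.2) PySem.Str.len)
              (PySem.List.max? lt PySem.Str.len) (PySem.List.max? le PySem.Str.len) := by
          simp only [pvBestStep, h1, pv_contains_BD]
          rw [if_pos (by rfl), pv_inner_loc, pv_bo_append]
        simp only [List.foldl, hA, hB]; exact ih _ _ _
      · by_cases h2 : pvBaseKey kv.1 = "time"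
        · have hA : pvMergeStep (pvMD la lt le) kv = pvMD la (lt ++ kv.2) le := by
            simp [pvMergeStep, h2, pv_contains_MD, pv_merge_time]
          have hB : pvBestStep (pvBD (PySem.List.max? la PySem.Str.len)
              (PySem.List.max? lt PySem.Str.len) (PySem.List.max? le PySem.Str.len)) kv =
              pvBD (PySem.List.max? la PySem.Str.len)
                (PySem.List.max? (lt ++ kv.2) PySem.Str.len) (PySem.List.max? le PySem.Str.len) := by
            simp only [pvBestStep, h2, pv_contains_BD]
            rw [if_pos (by rfl), pv_inner_time, pv_bo_append]
          simp only [List.foldl, hA, hB]; exact ih _ _ _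
        · by_cases h3 : pvBaseKey kv.1 = "extra"
          · have hA : pvMergeStep (pvMD la lt le) kv = pvMD la lt (le ++ kv.2) := by
              simp [pvMergeStep, h3, pv_contains_MD, pv_merge_extra]
            have hB : pvBestStep (pvBD (PySem.List.max? la PySem.Str.len)
                (PySem.List.max? lt PySem.Str.len) (PySem.List.max? le PySem.Str.len)) kv =
                pvBD (PySem.List.max? la PySem.Str.len) (PySem.List.max? lt PySem.Str.len)
                  (PySem.List.max? (le ++ kv.2) PySem.Str.len) := by
              simp only [pvBestStep, h3, pv_contains_BD]
              rw [if_pos (by rfl), pv_inner_extra, pv_bo_append]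
            simp only [List.foldl, hA, hB]; exact ih _ _ _
          · have hA : pvMergeStep (pvMD la lt le) kv = pvMD la lt le := by
              simp [pvMergeStep, pv_contains_MD, h1, h2, h3]
            have hB : pvBestStep (pvBD (PySem.List.max? la PySem.Str.len)
                (PySem.List.max? lt PySem.Str.len) (PySem.List.max? le PySem.Str.len)) kv =
                pvBD (PySem.List.max? la PySem.Str.len) (PySem.List.max? lt PySem.Str.len)
                  (PySem.List.max? le PySem.Str.len) := by
              simp [pvBestStep, pv_contains_BD, h1, h2, h3]
            simp only [List.foldl, hA, hB]; exact ih _ _ _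

-- the two post-processing phases agree on related final states
theorem pv_final (la lt le : List String) :
    ((pvMD la lt le).items.foldl pvReduceStep PySem.Dict.empty).items =
    ((pvBD (PySem.List.max? la PySem.Str.len) (PySem.List.max? lt PySem.Str.len)
        (PySem.List.max? le PySem.Str.len)).items.foldl (fun r p =>
          match p.2 with
          | some item => r.insert p.1 item
          | none => r) PySem.Dict.empty).items := by
  have key : ∀ l : List String,
      (!(PySem.List.dedup l).isEmpty) = (PySem.List.max? l PySem.Str.len).isSome := by
    intro l
    rcases h : PySem.List.max? l PySem.Str.len with _ | c
    · rw [PySem.List.max?_eq_none_iff] at h; subst h; rfl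
    · have hl : l ≠ [] := by
        intro hnil; subst hnil; simp [PySem.List.max?] at h
      rcases hd : PySem.List.dedup l with _ | ⟨y, ys⟩
      · exact absurd ((pv_dedup_eq_nil_iff l).mp hd) hl
      · simp
  have red : ∀ (r : PySem.Dict String String) (k : String) (l : List String),
      pvReduceStep r (k, l) =
        (match PySem.List.max? l PySem.Str.len with
         | some c => r.insert k c
         | none => r) := by
    intro r k l
    simp only [pvReduceStep, key, pv_bo_dedup]
    rcases h : PySem.List.max? l PySem.Str.len with _ | c <;> simp
  simp only [pvMD, pvBD, List.foldl, red]

-- ===== VERDICT (by name: the statement is the Claim_ definition above) =====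
theorem sanitize_tokens_py_spec : Claim_equal_sanitize_tokens_py := by
  intro raw_tokens _
  show ((raw_tokens.foldl pvMergeStep (pvMD [] [] [])).items.foldl pvReduceStep
      PySem.Dict.empty).items =
    ((raw_tokens.foldl pvBestStep
        (pvBD (PySem.List.max? [] PySem.Str.len) (PySem.List.max? [] PySem.Str.len)
          (PySem.List.max? [] PySem.Str.len))).items.foldl (fun r p =>
            match p.2 with
            | some item => r.insert p.1 item
            | none => r) PySem.Dict.empty).items
  obtain ⟨la', lt', le', hA, hB⟩ := pv_loop raw_tokens [] [] []
  rw [hA, hB]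
  exact pv_final la' lt' le'
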